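-- pv_equiv track=rewrite | github.com/Rajasekhar1131997/TIP102_Sessions | Week1Session1_APSV2.py | wealthiest_customer
-- ===== SOURCE A (Python) =====
-- def wealthiest_customer(accounts):
--     max_wealth = 0
--     result = []
--     for i in range(len(accounts)):
--         total = sum(accounts[i])
--         if total > max_wealth:
--             max_wealth = total
--             result = [i, max_wealth]
--     return result
-- ===== SOURCE B (Python) =====
-- def wealthiest_customer(accounts):
--     wealths = [sum(a) for a in accounts]
--     if not wealths:
--         return []
--     m = max(wealths)
--     if m <= 0:
--         return []
--     return [wealths.index(m), m]
-- ===== Notes on version B (the rewrite author's own statement) =====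
-- stated objective: idiomatic
-- what changed: Replaces the index-loop with its running (max, result) pair by a declarative pipeline: build the list of per-customer totals once, then use max() and list.index() for the first maximizer, with the same empty-result convention when no total is positive.
import Mathlib
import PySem

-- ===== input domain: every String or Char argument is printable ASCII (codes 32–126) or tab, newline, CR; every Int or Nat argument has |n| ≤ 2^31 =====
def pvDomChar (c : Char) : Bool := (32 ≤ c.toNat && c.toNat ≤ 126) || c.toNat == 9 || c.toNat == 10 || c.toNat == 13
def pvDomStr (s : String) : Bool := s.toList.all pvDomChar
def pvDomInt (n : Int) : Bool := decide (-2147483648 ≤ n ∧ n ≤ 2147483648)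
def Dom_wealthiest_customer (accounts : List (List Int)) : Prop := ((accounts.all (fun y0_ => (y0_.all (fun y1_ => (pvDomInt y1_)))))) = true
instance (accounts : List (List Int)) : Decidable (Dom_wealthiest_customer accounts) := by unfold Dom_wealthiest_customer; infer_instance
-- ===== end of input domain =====

-- B replaces A's running (max, result) index-loop by a declarative pipeline: totals list, max(), list.index() (idiomatic; same cost).


-- ===== PORT A =====
-- literal port: for i in range(len(accounts)) with accounts[i] becomes a fold over enumerate,
-- carrying the state (max_wealth, result) exactly as A does.
def wealthiest_customer (accounts : List (List Int)) : List Int :=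
  ((PySem.List.enumerate accounts 0).foldl
    (fun (st : Int × List Int) p =>
      let total := p.2.sum
      if total > st.1 then (total, [p.1, total]) else st)
    (0, ([] : List Int))).2

-- ===== PORT B =====
def wealthiest_customer_alt (accounts : List (List Int)) : List Int :=
  let wealths := accounts.map List.sum
  if wealths = [] then []
  else
    match PySem.List.max? wealths (fun x => x) with
    | none => []
    | some m =>
      if m ≤ 0 then []
      else
        match PySem.List.index? wealths m with
        | some k => [(k : Int), m]
        | none => []   -- unreachable: m ∈ wealths

-- ===== PRECONDITION & SPEC =====
def Spec_wealthiest_customer (accounts : List (List Int)) (out : List Int) : Prop := out = wealthiest_customer_alt accounts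
instance (accounts : List (List Int)) (out : List Int) : Decidable (Spec_wealthiest_customer accounts out) := by unfold Spec_wealthiest_customer; infer_instance

-- ===== CLAIM (what is proved, stated in full; the proofs are below) =====
def Claim_equal_wealthiest_customer : Prop := ∀ (accounts : List (List Int)), Dom_wealthiest_customer accounts → Spec_wealthiest_customer accounts (wealthiest_customer accounts)

-- ===== LEMMAS AND PROOFS =====

-- max? with identity key returns exactly the maximum value of a list of Ints
lemma max?_id_eq_iff (xs : List Int) (m : Int) :
    PySem.List.max? xs (fun x => x) = some m ↔ m ∈ xs ∧ ∀ y ∈ xs, y ≤ m := by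
  constructor
  · intro h
    exact ⟨PySem.List.max?_mem h, fun y hy => PySem.List.max?_isMax h y hy⟩
  · rintro ⟨hm, hmax⟩
    cases hmx : PySem.List.max? xs (fun x => x) with
    | none =>
      rw [PySem.List.max?_eq_none_iff] at hmx
      subst hmx; cases hm
    | some m' =>
      have h1 : m' ≤ m := hmax m' (PySem.List.max?_mem hmx)
      have h2 : m ≤ m' := PySem.List.max?_isMax hmx m hm
      rw [le_antisymm h1 h2]

-- invariant of A's loop over any suffix, start index and accumulated state
lemma loop_spec (l : List (List Int)) : ∀ (s M : Int) (R : List Int),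
    ((PySem.List.enumerate l s).foldl
      (fun (st : Int × List Int) p =>
        let total := p.2.sum
        if total > st.1 then (total, [p.1, total]) else st) (M, R)) =
    (match PySem.List.max? (l.map List.sum) (fun x => x) with
     | none => (M, R)
     | some m =>
       if M < m then
         (m, [s + (((PySem.List.index? (l.map List.sum) m).getD 0 : Nat) : Int), m])
       else (M, R)) := by
  induction l with
  | nil =>
    intro s M R
    have h0 : PySem.List.max? (([] : List (List Int)).map List.sum) (fun x => x) = none := by
      rw [PySem.List.max?_eq_none_iff]; rfl
    rw [h0]
    simp [PySem.List.enumerate_nil]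
  | cons a t ih =>
    intro s M R
    rw [PySem.List.enumerate_cons, List.foldl_cons]
    cases hw : PySem.List.max? (t.map List.sum) (fun x => x) with
    | none =>
      have ht : t.map List.sum = [] := by rwa [PySem.List.max?_eq_none_iff] at hw
      have hmx : PySem.List.max? ((a :: t).map List.sum) (fun x => x) = some a.sum := by
        rw [max?_id_eq_iff]; simp [ht]
      rw [hmx]
      simp only [List.map_cons, ht]
      by_cases h : a.sum > M
      · simp only [h, ih, hw]
        simp
      · simp only [h, ih, hw]
        simp
    | some m' =>
      have hm'mem : m' ∈ t.map List.sum := PySem.List.max?_mem hw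
      have hm'max : ∀ y ∈ t.map List.sum, y ≤ m' := fun y hy => PySem.List.max?_isMax hw y hy
      by_cases hc : a.sum < m'
      · -- the overall maximum m' comes from the tail
        have hmx : PySem.List.max? ((a :: t).map List.sum) (fun x => x) = some m' := by
          rw [max?_id_eq_iff]
          refine ⟨by simp [hm'mem], ?_⟩
          intro y hy
          simp only [List.map_cons, List.mem_cons] at hy
          rcases hy with rfl | hy
          · omega
          · exact hm'max y hy
        rw [hmx]
        have hne : List.sum a ≠ m' := by omega
        obtain ⟨k, hk⟩ : ∃ k, PySem.List.index? (t.map List.sum) m' = some k :=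
          Option.isSome_iff_exists.mp ((PySem.List.index?_isSome_iff (t.map List.sum) m').mpr hm'mem)
        have hidx : PySem.List.index? ((a :: t).map List.sum) m' = some (k + 1) := by
          simp only [List.map_cons]
          rw [PySem.List.index?_cons_of_ne (List.map List.sum t) hne, hk]
          rfl
        by_cases h : a.sum > M
        · simp only [h, ih, hw]
          have hM : M < m' := by omega
          simp only [hc, hM, if_true, hidx, hk, Option.getD_some]
          simp [add_assoc, add_comm 1 ((k : Int))]
        · simp only [h, ih, hw, if_false]
          by_cases hM : M < m'
          · simp only [hM, if_true, hidx, hk, Option.getD_some]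
            simp [add_assoc, add_comm 1 ((k : Int))]
          · simp [hM]
      · -- a.sum is the overall maximum
        have hmx : PySem.List.max? ((a :: t).map List.sum) (fun x => x) = some a.sum := by
          rw [max?_id_eq_iff]
          refine ⟨by simp, ?_⟩
          intro y hy
          simp only [List.map_cons, List.mem_cons] at hy
          rcases hy with rfl | hy
          · exact le_refl _
          · have := hm'max y hy; omega
        rw [hmx]
        by_cases h : a.sum > M
        · simp only [h, ih, hw, if_true]
          rw [if_neg hc]
          simp only [List.map_cons]
          rw [PySem.List.index?_cons_self]
          simp
        · simp only [h, ih, hw]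
          have h1 : ¬ M < m' := by omega
          simp [h1]

-- ===== VERDICT (by name: the statement is the Claim_ definition above) =====
theorem wealthiest_customer_spec : Claim_equal_wealthiest_customer := by
  intro accounts _
  unfold Spec_wealthiest_customer
  simp only [wealthiest_customer, wealthiest_customer_alt]
  rw [loop_spec]
  cases hmx : PySem.List.max? (accounts.map List.sum) (fun x => x) with
  | none =>
    have h0 : accounts.map List.sum = [] := by rwa [PySem.List.max?_eq_none_iff] at hmx
    simp [h0]
  | some m =>
    have hmem : m ∈ accounts.map List.sum := PySem.List.max?_mem hmx
    have hne : accounts.map List.sum ≠ [] := by rintro h; rw [h] at hmem; cases hmem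
    obtain ⟨k, hk⟩ : ∃ k, PySem.List.index? (accounts.map List.sum) m = some k :=
      Option.isSome_iff_exists.mp ((PySem.List.index?_isSome_iff (accounts.map List.sum) m).mpr hmem)
    by_cases hp : (0 : Int) < m
    · have hk' : List.idxOf? m (List.map List.sum accounts) = some k := by simpa using hk
      simp [hne, hk', hp, show ¬ m ≤ 0 by omega]
    · simp [hne, hp, show m ≤ 0 by omega]
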